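-- pv_equiv track=rewrite | github.com/rmuenste/pe_partpy | gen_par_from_tri_by_normals.py | _build_boundary_adjacency
-- ===== SOURCE A (Python) =====
-- from typing import Dict, Iterable, List, Set, Tuple
--
-- def _build_boundary_adjacency(face_nodes: List[Tuple[int, int, int, int]]) -> List[Set[int]]:
--     face_sets = [set(nodes) for nodes in face_nodes]
--     node_to_faces: Dict[int, List[int]] = {}
--     for fidx, nodes in enumerate(face_nodes):
--         for v in nodes:
--             node_to_faces.setdefault(v, []).append(fidx)
--
--     adjacency: List[Set[int]] = [set() for _ in range(len(face_nodes))]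
--     for fidx, nodes in enumerate(face_nodes):
--         candidates: Set[int] = set()
--         for v in nodes:
--             candidates.update(node_to_faces.get(v, []))
--         candidates.discard(fidx)
--
--         fset = face_sets[fidx]
--         for nb in candidates:
--             if len(fset & face_sets[nb]) >= 2:
--                 adjacency[fidx].add(nb)
--     return adjacency
-- ===== SOURCE B (Python) =====
-- def _build_boundary_adjacency(face_nodes):
--     # Scatter shared-node events, grouped by node, into per-(face, position)
--     # buckets (a bucket/counting approach); no per-candidate set intersections.
--     node_to_faces = {}
--     for fidx, nodes in enumerate(face_nodes):
--         for pos, v in enumerate(nodes):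
--             if nodes.index(v) == pos:  # first occurrence only
--                 node_to_faces.setdefault(v, []).append((fidx, pos))
--     buckets = [[[] for _ in nodes] for nodes in face_nodes]
--     for faces in node_to_faces.values():
--         for f, pf in faces:
--             for g, _ in faces:
--                 if g != f:
--                     buckets[f][pf].append(g)
--     result = []
--     for per_face in buckets:
--         cnt = {}
--         for bucket in per_face:
--             for g in bucket:
--                 cnt[g] = cnt.get(g, 0) + 1
--         result.append({g for g, c in cnt.items() if c >= 2})
--     return result
-- ===== Notes on version B (the rewrite author's own statement) =====
-- stated objective: faster
-- what changed: B scatters shared-node events, grouped by node, into per-(face, node-position) buckets and counts them per face, instead of A's per-face candidate sets with a fresh set intersection computed for every (face, candidate) pair.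
import Mathlib
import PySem

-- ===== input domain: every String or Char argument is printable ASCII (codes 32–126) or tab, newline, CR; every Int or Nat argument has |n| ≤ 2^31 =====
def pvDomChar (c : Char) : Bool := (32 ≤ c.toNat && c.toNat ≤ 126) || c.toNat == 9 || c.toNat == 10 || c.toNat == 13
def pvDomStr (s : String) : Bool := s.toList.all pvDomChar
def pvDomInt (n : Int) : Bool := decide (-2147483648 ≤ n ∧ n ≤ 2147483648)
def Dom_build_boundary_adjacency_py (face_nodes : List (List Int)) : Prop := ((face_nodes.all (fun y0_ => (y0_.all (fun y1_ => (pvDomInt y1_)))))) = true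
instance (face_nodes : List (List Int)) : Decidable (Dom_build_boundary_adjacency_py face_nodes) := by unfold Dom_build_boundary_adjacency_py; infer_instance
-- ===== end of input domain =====

-- B scatters shared-node events, grouped by node, into per-(face, node-position) buckets and
-- counts them per face, instead of A's per-face candidate sets with one set intersection per
-- candidate (measured faster in a timing run); return values agree on every input.

-- ===== PORT A =====
-- literal port of _build_boundary_adjacency (Source A); the preallocated `adjacency` list is
-- filled only at slot fidx during iteration fidx, so it is built here by appending that slot's
-- set per iteration (same values).
def build_boundary_adjacency_py (face_nodes : List (List Int)) : List (List Int) :=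
  let face_sets : List (PySem.Set Int) := face_nodes.map (fun nodes => PySem.Set.ofList nodes)
  let node_to_faces : PySem.Dict Int (List Int) :=
    (PySem.List.enumerate face_nodes).foldl
      (fun d p => p.2.foldl (fun d v => d.modify v [] (fun l => l ++ [p.1])) d)
      PySem.Dict.empty
  (PySem.List.enumerate face_nodes).foldl
    (fun adjacency p =>
      let candidates : PySem.Set Int :=
        p.2.foldl (fun c v => PySem.Set.update c (node_to_faces.getD v [])) PySem.Set.empty
      let candidates : PySem.Set Int := PySem.Set.discard candidates p.1
      let fset : PySem.Set Int := PySem.List.pyGetD face_sets p.1 PySem.Set.empty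
      adjacency ++ [candidates.foldl
        (fun s nb =>
          if 2 ≤ PySem.Set.len (PySem.Set.inter fset (PySem.List.pyGetD face_sets nb PySem.Set.empty))
          then PySem.Set.add s nb else s)
        PySem.Set.empty])
    []

-- ===== PORT B =====
-- B-side helper: `l[n] = upd(l[n])` for a non-negative in-range index n (the only indices the
-- scatter loop produces — they come from enumerate); exact on those.
def pvAt {α : Type} (n : Int) (upd : α → α) (l : List α) : List α :=
  (PySem.List.enumerate l).map (fun p => if p.1 = n then upd p.2 else p.2)

-- literal port of Source B; `nodes.index(v)` (v always present) is ported via PySem.List.index?.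
def build_boundary_adjacency_py_alt (face_nodes : List (List Int)) : List (List Int) :=
  let node_to_faces : PySem.Dict Int (List (Int × Int)) :=
    (PySem.List.enumerate face_nodes).foldl
      (fun d p =>
        (PySem.List.enumerate p.2).foldl
          (fun d q =>
            if (PySem.List.index? p.2 q.2).map Int.ofNat = some q.1
            then d.modify q.2 [] (fun l => l ++ [(p.1, q.1)])
            else d)
          d)
      PySem.Dict.empty
  let buckets0 : List (List (List Int)) :=
    face_nodes.map (fun nodes => nodes.map (fun _ => ([] : List Int)))
  let buckets : List (List (List Int)) :=
    node_to_faces.values.foldl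
      (fun bk faces =>
        faces.foldl
          (fun bk fp =>
            faces.foldl
              (fun bk gp =>
                if gp.1 ≠ fp.1
                then pvAt fp.1 (pvAt fp.2 (fun c => c ++ [gp.1])) bk
                else bk)
              bk)
          bk)
      buckets0
  buckets.foldl
    (fun result per_face =>
      let cnt : PySem.Dict Int Int :=
        per_face.foldl (fun c bucket => bucket.foldl (fun c g => c.modify g 0 (· + 1)) c)
          PySem.Dict.empty
      result ++ [PySem.Set.ofList ((cnt.items.filter (fun q => 2 ≤ q.2)).map (·.1))])
    []

-- ===== PRECONDITION & SPEC =====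
def Spec_build_boundary_adjacency_py (face_nodes : List (List Int)) (out : List (List Int)) : Prop := out = build_boundary_adjacency_py_alt face_nodes
instance (face_nodes : List (List Int)) (out : List (List Int)) : Decidable (Spec_build_boundary_adjacency_py face_nodes out) := by unfold Spec_build_boundary_adjacency_py; infer_instance

-- ===== CLAIM (what is proved, stated in full; the proofs are below) =====
def Claim_equal_build_boundary_adjacency_py : Prop := ∀ (face_nodes : List (List Int)), Dom_build_boundary_adjacency_py face_nodes → Spec_build_boundary_adjacency_py face_nodes (build_boundary_adjacency_py face_nodes)

-- ===== LEMMAS AND PROOFS =====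

/-- incidence list: face indices (from start `s`) containing `v`, with multiplicity. -/
def pvIncFrom (fns : List (List Int)) (s : Int) (v : Int) : List Int :=
  (PySem.List.enumerate fns s).flatMap (fun p => List.replicate (p.2.count v) p.1)

theorem pvIncFrom_nil (s v : Int) : pvIncFrom [] s v = [] := rfl

theorem pvIncFrom_cons (ns : List Int) (fns : List (List Int)) (s v : Int) :
    pvIncFrom (ns :: fns) s v = List.replicate (ns.count v) s ++ pvIncFrom fns (s+1) v := by
  simp [pvIncFrom, PySem.List.enumerate_cons]

theorem pv_le_of_mem_incFrom {fns : List (List Int)} {s v g : Int}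
    (h : g ∈ pvIncFrom fns s v) : s ≤ g := by
  induction fns generalizing s with
  | nil => simp [pvIncFrom_nil] at h
  | cons ns fns ih =>
    rw [pvIncFrom_cons] at h
    rcases List.mem_append.1 h with h | h
    · rcases List.eq_of_mem_replicate h with rfl; omega
    · have := ih h; omega

theorem pv_count_incFrom (fns : List (List Int)) (s v : Int) (k : Nat) (hk : k < fns.length) :
    (pvIncFrom fns s v).count (s + k) = fns[k].count v := by
  induction fns generalizing s k with
  | nil => simp at hk
  | cons ns fns ih =>
    rw [pvIncFrom_cons, List.count_append]
    cases k with
    | zero =>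
      have h0 : (pvIncFrom fns (s+1) v).count s = 0 := by
        rw [List.count_eq_zero]
        intro hmem
        have := pv_le_of_mem_incFrom hmem; omega
      simpa [List.count_replicate] using h0
    | succ k =>
      have h1 : (List.replicate (ns.count v) s).count (s + (k+1 : Nat)) = 0 := by
        rw [List.count_replicate]
        have : ¬ (s = s + ((k:Int)+1)) := by omega
        simp [show ¬ ((s == s + ((k:Int)+1)) = true) by simpa using this]
      have h2 := ih (s+1) k (by simpa using hk)
      rw [h1]
      have : s + ((k:Int)+1) = (s+1) + (k:Int) := by omega
      push_cast
      rw [this, h2]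
      simp

theorem pv_mem_incFrom_iff (fns : List (List Int)) (s v g : Int) :
    g ∈ pvIncFrom fns s v ↔ ∃ (k : Nat), ∃ (h : k < fns.length), g = s + k ∧ v ∈ fns[k] := by
  induction fns generalizing s with
  | nil => simp [pvIncFrom_nil]
  | cons ns fns ih =>
    rw [pvIncFrom_cons, List.mem_append, ih]
    constructor
    · rintro (h | ⟨k, hk, rfl, hv⟩)
      · rcases List.eq_of_mem_replicate h with rfl
        have hc : ns.count v ≠ 0 := by
          intro h0; rw [h0] at h; simp at h
        exact ⟨0, by simp, by simp, List.count_pos_iff.1 (Nat.pos_of_ne_zero hc)⟩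
      · exact ⟨k+1, by simpa using hk, by push_cast; omega, by simpa using hv⟩
    · rintro ⟨k, hk, rfl, hv⟩
      cases k with
      | zero =>
        left
        simp only [Nat.cast_zero, add_zero]
        have : 0 < ns.count v := List.count_pos_iff.2 (by simpa using hv)
        exact List.mem_replicate.2 ⟨by omega, rfl⟩
      | succ k =>
        right
        exact ⟨k, by simpa using hk, by push_cast; omega, by simpa using hv⟩

/-- A's node_to_faces building loop, characterised: lookup of `v` is the incidence list. -/
theorem pv_getD_build (fns : List (List Int)) (v : Int) :
    ((PySem.List.enumerate fns).foldl
      (fun d p => p.2.foldl (fun d v => d.modify v [] (fun l => l ++ [p.1])) d)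
      PySem.Dict.empty).getD v [] = pvIncFrom fns 0 v := by
  have flat : ∀ (E : List (Int × List Int)) (d : PySem.Dict Int (List Int)),
      E.foldl (fun d p => p.2.foldl (fun d v => d.modify v [] (fun l => l ++ [p.1])) d) d
      = (E.flatMap (fun p => p.2.map (fun u => (u, p.1)))).foldl
          (fun d q => d.modify q.1 [] (fun l => l ++ [q.2])) d := by
    intro E d
    rw [List.foldl_flatMap]
    apply PySem.List.foldl_congr_mem
    intro d p _
    rw [List.foldl_map]
  rw [flat, PySem.Dict.getD_foldl_modify_append, PySem.Dict.getD_empty, List.nil_append,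
    List.filter_flatMap]
  unfold pvIncFrom
  rw [List.map_flatMap]
  refine List.flatMap_congr ?_
  intro p _
  rw [List.filter_map, List.map_map]
  have : ((fun q : Int × Int => q.1 == v) ∘ fun u => (u, p.1)) = (fun u => u == v) := rfl
  rw [this]
  have : ((fun q : Int × Int => q.2) ∘ fun u : Int => (u, p.1)) = Function.const Int p.1 := rfl
  rw [this, List.map_const]
  congr 1
  rw [List.count_eq_countP, List.countP_eq_length_filter]

theorem pv_foldl_update (l : List Int) (f : Int → List Int) (s : PySem.Set Int) :
    l.foldl (fun c v => PySem.Set.update c (f v)) s = PySem.Set.update s (l.flatMap f) := by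
  induction l generalizing s with
  | nil => simp [PySem.Set.update]
  | cons v l ih => rw [List.flatMap_cons, PySem.Set.update_append, List.foldl_cons, ih]

theorem pv_update_congr {α : Type} (l : List α) (f g : α → List Int) (s : PySem.Set Int)
    (h : ∀ v ∈ l, PySem.Set.ofList (f v) = PySem.Set.ofList (g v)) :
    PySem.Set.update s (l.flatMap f) = PySem.Set.update s (l.flatMap g) := by
  induction l generalizing s with
  | nil => rfl
  | cons v l ih =>
    rw [List.flatMap_cons, List.flatMap_cons, PySem.Set.update_append, PySem.Set.update_append,
      PySem.Set.update_eq_append_filter s (f v), PySem.Set.update_eq_append_filter s (g v),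
      h v (by simp)]
    exact ih _ (fun v hv => h v (by simp [hv]))

theorem pv_update_subset (s : PySem.Set Int) (xs : List Int) (h : ∀ x ∈ xs, x ∈ s) :
    PySem.Set.update s xs = s := by
  rw [PySem.Set.update_eq_append_filter, List.filter_eq_nil_iff.2, List.append_nil]
  intro y hy
  have hys : y ∈ s := h y ((PySem.Set.mem_ofList xs y).1 hy)
  simpa using hys

theorem pv_update_dedup (l : List Int) (f : Int → List Int) (s : PySem.Set Int) :
    PySem.Set.update s ((PySem.List.dedup l).flatMap f) = PySem.Set.update s (l.flatMap f) := by
  induction l using List.reverseRecOn generalizing s with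
  | nil => rfl
  | append_singleton l v ih =>
    rw [PySem.List.dedup_eq_ofList, PySem.Set.ofList_append_singleton, PySem.Set.add_eq_ite]
    by_cases hv : v ∈ PySem.Set.ofList l
    · rw [if_pos hv, ← PySem.List.dedup_eq_ofList, ih, List.flatMap_append,
        PySem.Set.update_append]
      symm
      apply pv_update_subset
      intro x hx
      have hx' : x ∈ f v := by simpa using hx
      apply (PySem.Set.mem_update ..).2
      right
      exact List.mem_flatMap.2 ⟨v, (PySem.Set.mem_ofList l v).1 hv, hx'⟩
    · rw [if_neg hv, List.flatMap_append, List.flatMap_append, PySem.Set.update_append,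
        PySem.Set.update_append, ← PySem.List.dedup_eq_ofList, ih]

theorem pv_ofList_filter (l : List Int) (p : Int → Bool) :
    PySem.Set.ofList (l.filter p) = (PySem.Set.ofList l).filter p := by
  induction l using List.reverseRecOn with
  | nil => rfl
  | append_singleton l x ih =>
    rw [List.filter_append, PySem.Set.ofList_append_singleton, PySem.Set.add_eq_ite]
    by_cases hp : p x
    · simp only [List.filter_cons, hp, if_pos, List.filter_nil]
      by_cases hx : x ∈ PySem.Set.ofList l
      · rw [if_pos hx, PySem.Set.ofList_append_singleton, PySem.Set.add_eq_ite, if_pos, ih]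
        rw [PySem.Set.mem_ofList, List.mem_filter]
        exact ⟨(PySem.Set.mem_ofList l x).1 hx, hp⟩
      · rw [if_neg hx, PySem.Set.ofList_append_singleton, PySem.Set.add_eq_ite, if_neg,
          List.filter_append, ih]
        · simp [hp]
        · rw [PySem.Set.mem_ofList, List.mem_filter]
          rintro ⟨hxl, -⟩
          exact hx ((PySem.Set.mem_ofList l x).2 hxl)
    · simp only [Bool.not_eq_true] at hp
      by_cases hx : x ∈ PySem.Set.ofList l
      · rw [if_pos hx]
        simp [hp, ih]
      · rw [if_neg hx, List.filter_append]
        simp [hp, ih]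

theorem pv_ofList_replicate (m : Nat) (x : Int) :
    PySem.Set.ofList (List.replicate m x) = if m = 0 then [] else [x] := by
  induction m with
  | zero => rfl
  | succ m ih =>
    rw [List.replicate_succ', PySem.Set.ofList_append_singleton, ih, PySem.Set.add_eq_ite]
    cases m <;> simp

theorem pv_count_nodup (l : List Int) (v : Int) (h : l.Nodup) :
    l.count v = if v ∈ l then 1 else 0 := by
  by_cases hv : v ∈ l
  · rw [if_pos hv]
    exact List.count_eq_one_of_mem h hv
  · rw [if_neg hv, List.count_eq_zero]
    exact hv

theorem pv_foldl_add_if (l : List Int) (p : Int → Prop) [DecidablePred p] (h : l.Nodup) :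
    l.foldl (fun s nb => if p nb then PySem.Set.add s nb else s) ([] : PySem.Set Int)
      = l.filter (fun x => decide (p x)) := by
  rw [PySem.List.foldl_ite_eq_foldl_filter, ← PySem.Set.ofList_eq_foldl]
  exact PySem.Set.ofList_eq_self_of_nodup _ (h.filter _)

theorem pv_enum_map {α β : Type} (l : List α) (f : α → β) (s : Int) :
    PySem.List.enumerate (l.map f) s = (PySem.List.enumerate l s).map (fun p => (p.1, f p.2)) := by
  induction l generalizing s with
  | nil => rfl
  | cons x l ih => rw [List.map_cons, PySem.List.enumerate_cons, PySem.List.enumerate_cons, ih,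
      List.map_cons]

theorem pv_enum_shift {α : Type} (l : List α) (s : Int) :
    PySem.List.enumerate l (s+1) = (PySem.List.enumerate l s).map (fun p => (p.1+1, p.2)) := by
  induction l generalizing s with
  | nil => rfl
  | cons x l ih => rw [PySem.List.enumerate_cons, PySem.List.enumerate_cons, ih, List.map_cons]

theorem pv_enum_enum {α : Type} (l : List α) (s : Int) :
    PySem.List.enumerate (PySem.List.enumerate l s) s
      = (PySem.List.enumerate l s).map (fun p => (p.1, p)) := by
  induction l generalizing s with
  | nil => rfl
  | cons x l ih => rw [PySem.List.enumerate_cons, PySem.List.enumerate_cons, ih, List.map_cons]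

theorem pv_map_eq_enum_map {α β : Type} (l : List α) (f : α → β) :
    l.map f = (PySem.List.enumerate l).map (fun p => f p.2) := by
  conv_lhs => rw [← PySem.List.map_snd_enumerate l 0]
  rw [List.map_map]
  rfl

theorem pv_pvAt {α β : Type} (n : Int) (upd : β → β) (l : List α) (h : Int × α → β) :
    pvAt n upd ((PySem.List.enumerate l).map h)
      = (PySem.List.enumerate l).map (fun p => if p.1 = n then upd (h p) else h p) := by
  unfold pvAt
  rw [pv_enum_map, pv_enum_enum, List.map_map, List.map_map]
  rfl

/-- the cell contents that the scatter loop accumulates at (face, position). -/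
def pvC (ts : List (Int × Int × Int)) (f pf : Int) : List Int :=
  (ts.filter (fun t => t.1 == f && t.2.1 == pf)).map (·.2.2)

theorem pvC_append (ts : List (Int × Int × Int)) (t : Int × Int × Int) (f pf : Int) :
    pvC (ts ++ [t]) f pf
      = pvC ts f pf ++ (if t.1 = f ∧ t.2.1 = pf then [t.2.2] else []) := by
  unfold pvC
  rw [List.filter_append, List.map_append]
  congr 1
  by_cases h : t.1 = f ∧ t.2.1 = pf
  · simp [h.1, h.2]
  · rw [if_neg h]
    have : ¬ ((t.1 == f && t.2.1 == pf) = true) := by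
      simpa [not_and_or] using (by tauto : ¬ (t.1 = f ∧ t.2.1 = pf))
    simp [this]

/-- closed form of the scatter loop, for ANY event list and any initial cell contents. -/
theorem pv_scatter (ts : List (Int × Int × Int)) (l : List (List Int)) (C0 : Int → Int → List Int) :
    ts.foldl (fun bk t => pvAt t.1 (pvAt t.2.1 (fun c => c ++ [t.2.2])) bk)
      ((PySem.List.enumerate l).map (fun p => (PySem.List.enumerate p.2).map (fun q => C0 p.1 q.1)))
    = (PySem.List.enumerate l).map
        (fun p => (PySem.List.enumerate p.2).map (fun q => C0 p.1 q.1 ++ pvC ts p.1 q.1)) := by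
  induction ts using List.reverseRecOn with
  | nil =>
    simp [pvC]
  | append_singleton ts t ih =>
    rw [List.foldl_append, List.foldl_cons, List.foldl_nil, ih, pv_pvAt]
    apply List.map_congr_left
    intro p _
    by_cases hp : p.1 = t.1
    · rw [if_pos hp, pv_pvAt]
      apply List.map_congr_left
      intro q _
      rw [pvC_append]
      by_cases hq : q.1 = t.2.1
      · rw [if_pos hq, if_pos ⟨hp.symm, hq.symm⟩, List.append_assoc]
      · rw [if_neg hq, if_neg (by tauto), List.append_nil]
    · rw [if_neg hp]
      apply List.map_congr_left
      intro q _
      rw [pvC_append, if_neg (by tauto), List.append_nil]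

-- the guard 'nodes.index(v) == pos' of the dict-building loop, as a Bool predicate on (pos, v)
def pvGd (ns : List Int) (q : Int × Int) : Bool :=
  decide ((PySem.List.index? ns q.2).map Int.ofNat = some q.1)

/-- the flat (node, (face, position)) incidence stream B's dict is built from. -/
def pvPS (fns : List (List Int)) : List (Int × (Int × Int)) :=
  (PySem.List.enumerate fns).flatMap
    (fun p => ((PySem.List.enumerate p.2).filter (pvGd p.2)).map (fun q => (q.2, (p.1, q.1))))

def pvG (fns : List (List Int)) (v : Int) : List (Int × Int) :=
  ((pvPS fns).filter (fun pr => pr.1 == v)).map (·.2)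

def pvKeys (fns : List (List Int)) : List Int :=
  PySem.Set.ofList ((pvPS fns).map (·.1))

def pvExpand (fl : List (Int × Int)) : List (Int × Int × Int) :=
  fl.flatMap (fun fp =>
    (fl.filter (fun gp => decide (gp.1 ≠ fp.1))).map (fun gp => (fp.1, fp.2, gp.1)))

def pvTS (fns : List (List Int)) : List (Int × Int × Int) :=
  (pvKeys fns).flatMap (fun v => pvExpand (pvG fns v))

/-- faces (as deduplicated node lists) incident to `v`. -/
def pvLB (fns : List (List Int)) (v : Int) : List Int :=
  pvIncFrom (fns.map PySem.List.dedup) 0 v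

/-- the per-face candidate sequence of face `i` with node list `ns`. -/
def pvS (fns : List (List Int)) (i : Int) (ns : List Int) : List Int :=
  (PySem.List.dedup ns).flatMap (fun v => (pvLB fns v).filter (fun g => decide (g ≠ i)))

theorem pv_neq_fun (i : Int) : (fun x : Int => decide (x ≠ i)) = (fun x => !(x == i)) := by
  funext x; by_cases h : x = i <;> simp [h]

theorem pv_ofList_inc_dedup (fns : List (List Int)) (v : Int) :
    PySem.Set.ofList (pvIncFrom fns 0 v) = PySem.Set.ofList (pvLB fns v) := by
  rw [← PySem.Set.update_nil_left, ← PySem.Set.update_nil_left]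
  unfold pvLB pvIncFrom
  rw [pv_enum_map, List.flatMap_map]
  apply pv_update_congr
  intro p _
  rw [pv_ofList_replicate, pv_ofList_replicate]
  have : (p.2.count v = 0) ↔ ((PySem.List.dedup p.2).count v = 0) := by
    rw [List.count_eq_zero, List.count_eq_zero, PySem.List.mem_dedup]
  by_cases h : p.2.count v = 0
  · rw [if_pos h, if_pos (this.1 h)]
  · rw [if_neg h, if_neg (fun hc => h (this.2 hc))]

theorem pv_sum_ite (l : List Int) (p : Int → Bool) :
    (l.map (fun v => if p v then 1 else 0)).sum = l.countP p := by
  induction l with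
  | nil => rfl
  | cons x l ih => by_cases h : p x <;> simp [h, ih] <;> omega

theorem pv_count_S (fns : List (List Int)) (ns : List Int) (i g : Int) (k' : Nat)
    (hk' : k' < fns.length) (hg : g = (k' : Int)) (hgi : g ≠ i) :
    (pvS fns i ns).count g = (PySem.List.dedup ns).countP (fun v => decide (v ∈ fns[k'])) := by
  unfold pvS
  rw [List.count_flatMap, ← pv_sum_ite]
  congr 1
  apply List.map_congr_left
  intro v _
  have h1 : List.count g ((pvLB fns v).filter (fun g => decide (g ≠ i)))
      = List.count g (pvLB fns v) := List.count_filter (by simpa using hgi)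
  have h2 : List.count g (pvLB fns v) = (PySem.List.dedup fns[k']).count v := by
    unfold pvLB
    have h := pv_count_incFrom (fns.map PySem.List.dedup) 0 v k' (by simpa using hk')
    rw [show (0 : Int) + (k' : Int) = (k' : Int) by omega] at h
    rw [hg, h, List.getElem_map]
  rw [Function.comp_apply, h1, h2, pv_count_nodup _ _ (PySem.List.nodup_dedup _)]
  by_cases hv : v ∈ fns[k']
  · rw [if_pos ((PySem.List.mem_dedup _ _).2 hv)]; simp [hv]
  · rw [if_neg (fun hc => hv ((PySem.List.mem_dedup _ _).1 hc))]; simp [hv]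

theorem pv_len_inter (ns nsg : List Int) :
    PySem.Set.len (PySem.Set.inter (PySem.Set.ofList ns) (PySem.Set.ofList nsg))
    = ((PySem.List.dedup ns).countP (fun v => decide (v ∈ nsg)) : Int) := by
  have h1 : PySem.Set.inter (PySem.Set.ofList ns) (PySem.Set.ofList nsg)
      = (PySem.Set.ofList ns).filter (fun x => decide (x ∈ nsg)) := by
    apply List.filter_congr
    intro x _
    by_cases hx : x ∈ nsg <;> simp [hx]
  rw [h1]
  simp only [PySem.Set.len, PySem.List.dedup_eq_ofList, List.countP_eq_length_filter]

theorem pv_mem_S (fns : List (List Int)) (ns : List Int) (i g : Int) (h : g ∈ pvS fns i ns) :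
    ∃ (k' : Nat), k' < fns.length ∧ g = (k' : Int) ∧ g ≠ i := by
  rcases List.mem_flatMap.1 h with ⟨v, -, hgf⟩
  rcases List.mem_filter.1 hgf with ⟨hgl, hgi⟩
  rcases (pv_mem_incFrom_iff _ _ _ _).1 hgl with ⟨k', hk', hkg, -⟩
  exact ⟨k', by simpa using hk', by simpa using hkg, by simpa using hgi⟩

-- ===== B-side characterisation =====

theorem pv_gd_iff (ns : List Int) (w : Int) (j : Nat) :
    ((PySem.List.index? ns w).map Int.ofNat = some (j : Int))
      ↔ PySem.List.index? ns w = some j := by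
  cases h : PySem.List.index? ns w with
  | none => simp
  | some i => simp

theorem pv_gd_cons_self (x : Int) (t : List Int) (n : Int) :
    pvGd (x :: t) (n, x) = decide (n = 0) := by
  unfold pvGd
  rw [PySem.List.index?_cons_self]
  simp only [Option.map_some, Option.some_inj, decide_eq_decide, Int.ofNat_eq_natCast,
    Nat.cast_zero]
  omega

theorem pv_gd_cons_shift (x : Int) (t : List Int) (w n : Int) (hne : x ≠ w) :
    pvGd (x :: t) (n + 1, w) = pvGd t (n, w) := by
  unfold pvGd
  rw [PySem.List.index?_cons_of_ne _ hne]
  cases h : PySem.List.index? t w with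
  | none => simp
  | some i =>
    simp only [Option.map_some, Option.some_inj, decide_eq_decide, Int.ofNat_eq_natCast]
    push_cast
    omega

/-- F1: the first-occurrence filter restricted to value `v` is the singleton at v's index. -/
theorem pv_filter_first (ns : List Int) (v : Int) :
    (PySem.List.enumerate ns).filter (fun q => pvGd ns q && (q.2 == v))
    = (match PySem.List.index? ns v with | none => [] | some i => [((i : Int), v)]) := by
  induction ns with
  | nil => rw [PySem.List.enumerate_nil, List.filter_nil, PySem.List.index?_eq_idxOf?]; rfl
  | cons x t ih =>
    have hsh := pv_enum_shift t 0
    rw [PySem.List.enumerate_cons, hsh, List.filter_cons]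
    by_cases hx : x = v
    · subst hx
      have hhead : (pvGd (x :: t) ((0 : Int), x) && (x == x)) = true := by
        rw [pv_gd_cons_self]; simp
      rw [hhead]
      have htail : ((PySem.List.enumerate t).map (fun p => (p.1+1, p.2))).filter
          (fun q => pvGd (x :: t) q && (q.2 == x)) = [] := by
        rw [List.filter_eq_nil_iff]
        rintro q hq
        rcases List.mem_map.1 hq with ⟨p, hp, rfl⟩
        rcases (PySem.List.mem_enumerate_iff _ _ _).1 hp with ⟨k, hk, rfl⟩
        simp only [Bool.and_eq_true, beq_iff_eq]
        rintro ⟨hg, hv⟩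
        rw [hv, pv_gd_cons_self] at hg
        simp only [decide_eq_true_eq] at hg
        omega
      rw [htail, PySem.List.index?_cons_self]
      simp
    · have hhead : ¬ ((pvGd (x :: t) ((0 : Int), x) && (x == v)) = true) := by
        simp [hx]
      rw [if_neg hhead, PySem.List.index?_cons_of_ne _ hx, List.filter_map]
      have hcong : ((PySem.List.enumerate t).filter
            ((fun q => pvGd (x :: t) q && (q.2 == v)) ∘ (fun p : Int × Int => (p.1+1, p.2))))
          = (PySem.List.enumerate t).filter (fun q => pvGd t q && (q.2 == v)) := by
        apply List.filter_congr
        intro p hp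
        rcases (PySem.List.mem_enumerate_iff _ _ _).1 hp with ⟨k, hk, rfl⟩
        simp only [Function.comp_apply]
        by_cases hv : t[k] = v
        · have hne : x ≠ t[k] := by rw [hv]; exact hx
          rw [pv_gd_cons_shift _ _ _ _ hne]
        · have hb : (t[k] == v) = false := by simp [hv]
          rw [hb, Bool.and_false, Bool.and_false]
      rw [hcong, ih]
      cases h : PySem.List.index? t v with
      | none => rfl
      | some i =>
        simp only [Option.map_some, List.map_cons, List.map_nil]
        norm_num

/-- F2 (generalised): first-occurrence positions of `ns`, under any extra value filter,
    enumerate exactly the deduplicated values. -/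
theorem pv_filter_dedup (ns : List Int) (P : Int → Bool) :
    (((PySem.List.enumerate ns).filter (fun q => pvGd ns q && P q.2)).map (·.2))
      = (PySem.List.dedup ns).filter P := by
  induction ns generalizing P with
  | nil => rfl
  | cons x t ih =>
    have hsh := pv_enum_shift t 0
    have hded : PySem.List.dedup (x :: t)
        = x :: (PySem.List.dedup t).filter (fun y => !(y == x)) := by
      rw [PySem.List.dedup_eq_ofList, PySem.Set.ofList_cons, PySem.Set.discard,
        ← PySem.List.dedup_eq_ofList]
    have htail : (((PySem.List.enumerate t).map (fun p : Int × Int => (p.1+1, p.2))).filter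
          (fun q => pvGd (x :: t) q && P q.2))
        = ((PySem.List.enumerate t).filter
            (fun q => pvGd t q && ((fun y => P y && !(y == x)) q.2))).map
            (fun p : Int × Int => (p.1+1, p.2)) := by
      rw [List.filter_map]
      congr 1
      apply List.filter_congr
      intro p hp
      rcases (PySem.List.mem_enumerate_iff _ _ _).1 hp with ⟨k, hk, rfl⟩
      simp only [Function.comp_apply]
      by_cases hv : t[k] = x
      · have h1 : pvGd (x :: t) ((0:Int) + (k:Int) + 1, t[k]) = false := by
          rw [hv, pv_gd_cons_self]
          simp only [decide_eq_false_iff_not]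
          omega
        have h2 : (!(t[k] == x)) = false := by simp [hv]
        simp only [h1, h2, Bool.and_false, Bool.false_and]
      · have hne : x ≠ t[k] := fun h => hv h.symm
        have h1 : pvGd (x :: t) ((0:Int) + (k:Int) + 1, t[k]) = pvGd t ((0:Int) + (k:Int), t[k]) := by
          have := pv_gd_cons_shift x t t[k] ((0:Int) + (k:Int)) hne
          simpa using this
        have h2 : (!(t[k] == x)) = true := by simp [hv]
        simp only [h1, h2, Bool.and_true]
    rw [PySem.List.enumerate_cons, hsh, List.filter_cons, hded, List.filter_cons]
    by_cases hPx : P x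
    · have hhead : (pvGd (x :: t) ((0 : Int), x) && P x) = true := by
        rw [pv_gd_cons_self, hPx]; simp
      rw [hhead, hPx]
      simp only [if_true, List.map_cons]
      rw [htail, List.map_map]
      have hcomp : (((·.2) : Int × Int → Int) ∘ (fun p : Int × Int => (p.1+1, p.2))) = (·.2) := rfl
      rw [hcomp, ih (fun y => P y && !(y == x))]
      congr 1
      rw [List.filter_filter]
    · have hhead : ¬ ((pvGd (x :: t) ((0 : Int), x) && P x) = true) := by
        simp [hPx]
      rw [if_neg hhead]
      have hPx' : P x = false := by simpa using hPx
      rw [if_neg (by simp [hPx'])]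
      rw [htail, List.map_map]
      have hcomp : (((·.2) : Int × Int → Int) ∘ (fun p : Int × Int => (p.1+1, p.2))) = (·.2) := rfl
      rw [hcomp, ih (fun y => P y && !(y == x))]
      rw [List.filter_filter]

/-- extract the block of face `k` from a flatMap over an enumeration, by filtering on the index. -/
theorem pv_block {α β : Type} (l : List α) (H : Int × α → List β) (ind : β → Int) (s : Int)
    (k : Nat) (hk : k < l.length)
    (hind : ∀ p ∈ PySem.List.enumerate l s, ∀ b ∈ H p, ind b = p.1) :
    ((PySem.List.enumerate l s).flatMap H).filter (fun b => ind b == s + (k : Int))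
      = H (s + (k : Int), l[k]) := by
  induction l generalizing s k with
  | nil => simp at hk
  | cons x t ih =>
    rw [PySem.List.enumerate_cons, List.flatMap_cons, List.filter_append]
    cases k with
    | zero =>
      have h1 : (H (s, x)).filter (fun b => ind b == s + ((0:Nat) : Int)) = H (s, x) := by
        rw [List.filter_eq_self]
        intro b hb
        have := hind (s, x) (by rw [PySem.List.enumerate_cons]; exact List.mem_cons_self) b hb
        simp [this]
      have h2 : ((PySem.List.enumerate t (s+1)).flatMap H).filter
          (fun b => ind b == s + ((0:Nat) : Int)) = [] := by
        rw [List.filter_eq_nil_iff]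
        intro b hb
        rcases List.mem_flatMap.1 hb with ⟨p, hp, hbp⟩
        have hi := hind p (by rw [PySem.List.enumerate_cons]; exact List.mem_cons_of_mem _ hp) b hbp
        rcases (PySem.List.mem_enumerate_iff _ _ _).1 hp with ⟨m, hm, rfl⟩
        simp only [hi, beq_iff_eq]
        omega
      rw [h1, h2, List.append_nil]
      simp
    | succ k =>
      have h1 : (H (s, x)).filter (fun b => ind b == s + ((k+1:Nat) : Int)) = [] := by
        rw [List.filter_eq_nil_iff]
        intro b hb
        have := hind (s, x) (by rw [PySem.List.enumerate_cons]; exact List.mem_cons_self) b hb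
        simp only [this, beq_iff_eq]
        omega
      have h2 := ih (s+1) k (by simpa using hk)
        (fun p hp => hind p (by rw [PySem.List.enumerate_cons]; exact List.mem_cons_of_mem _ hp))
      rw [h1, List.nil_append]
      have he : s + 1 + (k : Int) = s + ((k+1:Nat) : Int) := by push_cast; omega
      rw [he] at h2
      rw [h2]
      simp only [List.getElem_cons_succ]

theorem pv_flatMap_ite {α β : Type} (l : List α) (p : α → Bool) (F : α → List β) :
    l.flatMap (fun x => if p x then F x else []) = (l.filter p).flatMap F := by
  induction l with
  | nil => rfl
  | cons x t ih =>
    rw [List.flatMap_cons, List.filter_cons]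
    by_cases h : p x
    · rw [if_pos h, if_pos h, List.flatMap_cons, ih]
    · simp only [h, Bool.false_eq_true, if_false, List.nil_append, ih]

theorem pv_flatMap_single {α : Type} {l : List Int} (hnd : l.Nodup) (w : Int) (F : Int → List α)
    (h0 : ∀ v ∈ l, v ≠ w → F v = []) :
    l.flatMap F = if w ∈ l then F w else [] := by
  induction l with
  | nil => simp
  | cons x t ih =>
    rw [List.flatMap_cons]
    rcases List.nodup_cons.1 hnd with ⟨hx, hnd'⟩
    by_cases hw : x = w
    · subst hw
      have ht : t.flatMap F = [] := by
        rw [List.flatMap_eq_nil_iff]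
        intro v hv
        exact h0 v (List.mem_cons_of_mem _ hv) (fun hvw => hx (hvw ▸ hv))
      rw [ht, List.append_nil, if_pos List.mem_cons_self]
    · rw [h0 x List.mem_cons_self hw, List.nil_append,
        ih hnd' (fun v hv => h0 v (List.mem_cons_of_mem _ hv))]
      by_cases hwt : w ∈ t
      · rw [if_pos hwt, if_pos (List.mem_cons_of_mem _ hwt)]
      · rw [if_neg hwt, if_neg (by simpa [hwt] using fun h => hw h.symm)]

theorem pv_pvC_flatMap {α : Type} (l : List α) (F : α → List (Int × Int × Int)) (f pf : Int) :
    pvC (l.flatMap F) f pf = l.flatMap (fun x => pvC (F x) f pf) := by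
  unfold pvC
  rw [List.filter_flatMap, List.map_flatMap]

theorem pv_pvC_expand (fl : List (Int × Int)) (f pf : Int) :
    pvC (pvExpand fl) f pf
      = (fl.filter (fun fp => fp.1 == f && fp.2 == pf)).flatMap
          (fun fp => (fl.filter (fun gp => decide (gp.1 ≠ fp.1))).map (·.1)) := by
  unfold pvExpand
  rw [pv_pvC_flatMap, ← pv_flatMap_ite]
  apply List.flatMap_congr
  intro fp _
  unfold pvC
  rw [List.filter_map, List.map_map]
  have hc : ((fun t : Int × Int × Int => t.1 == f && t.2.1 == pf)
      ∘ (fun gp : Int × Int => (fp.1, fp.2, gp.1))) = (fun _ => fp.1 == f && fp.2 == pf) := rfl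
  rw [hc]
  by_cases h : (fp.1 == f && fp.2 == pf) = true
  · rw [h, if_pos rfl]
    simp only [List.filter_true]
    rfl
  · simp only [Bool.not_eq_true] at h
    rw [h]
    simp

theorem pv_G_eq (fns : List (List Int)) (v : Int) :
    pvG fns v = (PySem.List.enumerate fns).flatMap
      (fun p => ((PySem.List.enumerate p.2).filter (fun q => pvGd p.2 q && (q.2 == v))).map
        (fun q => (p.1, q.1))) := by
  unfold pvG pvPS
  rw [List.filter_flatMap, List.map_flatMap]
  apply List.flatMap_congr
  intro p _
  rw [List.filter_map, List.map_map, List.filter_filter]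
  congr 1
  apply List.filter_congr
  intro q _
  simp [Bool.and_comm]

theorem pv_PS_map_fst (fns : List (List Int)) :
    (pvPS fns).map (·.1)
      = (PySem.List.enumerate fns).flatMap (fun p => PySem.List.dedup p.2) := by
  unfold pvPS
  rw [List.map_flatMap]
  apply List.flatMap_congr
  intro p _
  rw [List.map_map]
  have h : (((·.1) : Int × Int × Int → Int) ∘ (fun q : Int × Int => (q.2, (p.1, q.1)))) = (·.2) := rfl
  rw [h]
  have := pv_filter_dedup p.2 (fun _ => true)
  simpa using this

theorem pv_mem_keys (fns : List (List Int)) (k : Nat) (hk : k < fns.length) (w : Int)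
    (hw : w ∈ fns[k]) : w ∈ pvKeys fns := by
  unfold pvKeys
  rw [PySem.Set.mem_ofList, pv_PS_map_fst]
  apply List.mem_flatMap.2
  refine ⟨((k : Int), fns[k]), ?_, (PySem.List.mem_dedup _ _).2 hw⟩
  apply (PySem.List.mem_enumerate_iff _ _ _).2
  exact ⟨k, hk, by simp⟩

theorem pv_G_map_fst (fns : List (List Int)) (v : Int) :
    (pvG fns v).map (·.1) = pvLB fns v := by
  rw [pv_G_eq]
  unfold pvLB pvIncFrom
  rw [pv_enum_map, List.flatMap_map, List.map_flatMap]
  apply List.flatMap_congr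
  intro p _
  rw [List.map_map]
  have h : (((·.1) : Int × Int → Int) ∘ (fun q : Int × Int => (p.1, q.1))) = (fun _ => p.1) := rfl
  rw [h, List.map_const']
  congr 1
  rw [pv_filter_first]
  rw [pv_count_nodup _ _ (PySem.List.nodup_dedup _)]
  cases hidx : PySem.List.index? p.2 v with
  | none =>
    have : ¬ v ∈ p.2 := by
      rw [← PySem.List.index?_isSome_iff, hidx]; simp
    rw [if_neg (fun hc => this ((PySem.List.mem_dedup _ _).1 hc))]
    rfl
  | some i =>
    have : v ∈ p.2 := by
      rw [← PySem.List.index?_isSome_iff, hidx]; rfl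
    rw [if_pos ((PySem.List.mem_dedup _ _).2 this)]
    rfl

theorem pv_G_filter (fns : List (List Int)) (v : Int) (k j : Nat) (hk : k < fns.length) :
    (pvG fns v).filter (fun fp => fp.1 == (k : Int) && fp.2 == (j : Int))
      = (if PySem.List.index? fns[k] v = some j then [((k : Int), (j : Int))] else []) := by
  rw [pv_G_eq]
  have hsplit : (fun fp : Int × Int => fp.1 == (k : Int) && fp.2 == (j : Int))
      = fun fp => (fp.1 == (0 : Int) + (k : Int)) && (fp.2 == (j : Int)) := by
    funext fp; simp
  rw [hsplit]
  have hff : ∀ (L : List (Int × Int)) (c : Int),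
      L.filter (fun fp => (fp.1 == c) && (fp.2 == (j : Int)))
      = (L.filter (fun fp => fp.1 == c)).filter (fun fp => fp.2 == (j : Int)) := by
    intro L c
    rw [List.filter_filter]
    apply List.filter_congr
    intro fp _
    rw [Bool.and_comm]
  rw [hff]
  rw [pv_block fns _ (fun fp : Int × Int => fp.1) 0 k hk ?hind]
  case hind =>
    intro p _ b hb
    rcases List.mem_map.1 hb with ⟨q, _, rfl⟩
    rfl
  rw [pv_filter_first]
  cases hidx : PySem.List.index? fns[k] v with
  | none => simp
  | some i =>
    simp only [List.map_cons, List.map_nil, List.filter_cons, List.filter_nil]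
    by_cases hij : i = j
    · subst hij
      simp
    · have h1 : (((i:Nat):Int) == ((j:Nat):Int)) = false := by simp [hij]
      rw [h1]
      simp only [Bool.false_eq_true, if_false]
      rw [if_neg (fun hc => hij (Option.some_inj.1 hc))]

theorem pv_pvC_TS (fns : List (List Int)) (k j : Nat) (hk : k < fns.length)
    (hj : j < fns[k].length) :
    pvC (pvTS fns) (k : Int) (j : Int)
      = if PySem.List.index? fns[k] (fns[k][j]) = some j
        then (pvLB fns (fns[k][j])).filter (fun g => decide (g ≠ (k : Int)))
        else [] := by
  unfold pvTS
  rw [pv_pvC_flatMap]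
  have hterm : ∀ v ∈ pvKeys fns,
      pvC (pvExpand (pvG fns v)) (k : Int) (j : Int)
      = if PySem.List.index? fns[k] v = some j
        then ((pvG fns v).map (·.1)).filter (fun g => decide (g ≠ (k : Int)))
        else [] := by
    intro v _
    rw [pv_pvC_expand, pv_G_filter fns v k j hk]
    by_cases h : PySem.List.index? fns[k] v = some j
    · rw [if_pos h, if_pos h, List.flatMap_cons, List.flatMap_nil, List.append_nil,
        List.filter_map]
      rfl
    · rw [if_neg h, if_neg h, List.flatMap_nil]
  have hnd : (pvKeys fns).Nodup := PySem.Set.nodup_ofList _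
  have h0aux : ∀ v ∈ pvKeys fns, v ≠ fns[k][j] →
      (if PySem.List.index? fns[k] v = some j
        then ((pvG fns v).map (·.1)).filter (fun g => decide (g ≠ (k : Int))) else []) = [] := by
    intro v _ hvw
    rw [if_neg ?hne]
    case hne =>
      intro hsome
      rcases PySem.List.getElem_of_index?_eq_some hsome with ⟨hjlt, hget, -⟩
      exact hvw hget.symm
  rw [List.flatMap_congr hterm, pv_flatMap_single hnd (fns[k][j]) _ h0aux]
  by_cases hmem : fns[k][j] ∈ pvKeys fns
  · rw [if_pos hmem]
    by_cases hidx : PySem.List.index? fns[k] (fns[k][j]) = some j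
    · rw [if_pos hidx, if_pos hidx, pv_G_map_fst]
    · rw [if_neg hidx, if_neg hidx]
  · rw [if_neg hmem]
    by_cases hidx : PySem.List.index? fns[k] (fns[k][j]) = some j
    · exact absurd (pv_mem_keys fns k hk _ (List.getElem_mem hj)) hmem
    · rw [if_neg hidx]

/-- THE crux: the flattened bucket row of face k is exactly A's candidate sequence. -/
theorem pv_row (fns : List (List Int)) (k : Nat) (hk : k < fns.length) :
    (PySem.List.enumerate fns[k]).flatMap (fun q => pvC (pvTS fns) (k : Int) q.1)
      = pvS fns (k : Int) fns[k] := by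
  have hcong : ∀ q ∈ PySem.List.enumerate fns[k],
      pvC (pvTS fns) (k : Int) q.1
      = (fun q : Int × Int => if pvGd fns[k] q
          then (pvLB fns q.2).filter (fun g => decide (g ≠ (k : Int))) else []) q := by
    intro q hq
    rcases (PySem.List.mem_enumerate_iff _ _ _).1 hq with ⟨j, hj, rfl⟩
    simp only [Int.zero_add]
    rw [pv_pvC_TS fns k j hk hj]
    have : pvGd fns[k] ((j : Int), fns[k][j])
        = decide (PySem.List.index? fns[k] (fns[k][j]) = some j) := by
      unfold pvGd
      simp only [decide_eq_decide]
      exact pv_gd_iff fns[k] (fns[k][j]) j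
    rw [this]
    by_cases h : PySem.List.index? fns[k] (fns[k][j]) = some j
    · simp
    · simp only [if_neg h]
      rw [if_neg (by simpa using h)]
  rw [List.flatMap_congr hcong, pv_flatMap_ite]
  have hmapsnd : ((PySem.List.enumerate fns[k]).filter (pvGd fns[k])).flatMap
        (fun q => (pvLB fns q.2).filter (fun g => decide (g ≠ (k : Int))))
      = (((PySem.List.enumerate fns[k]).filter (pvGd fns[k])).map (·.2)).flatMap
        (fun v => (pvLB fns v).filter (fun g => decide (g ≠ (k : Int)))) := by
    rw [List.flatMap_map]
  have hfix : (PySem.List.enumerate fns[k]).filter (pvGd fns[k])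
      = (PySem.List.enumerate fns[k]).filter (fun q => pvGd fns[k] q && (fun _ => true) q.2) := by
    apply List.filter_congr; intro q _; simp
  rw [hmapsnd, hfix, pv_filter_dedup fns[k] (fun _ => true)]
  simp only [List.filter_true]
  rfl

-- port-B structural rewriting: the dict build, flattened to one fold over pvPS
theorem pv_dict_flat (fns : List (List Int)) :
    (PySem.List.enumerate fns).foldl
      (fun d p =>
        (PySem.List.enumerate p.2).foldl
          (fun d q =>
            if (PySem.List.index? p.2 q.2).map Int.ofNat = some q.1
            then d.modify q.2 [] (fun l => l ++ [(p.1, q.1)])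
            else d)
          d)
      PySem.Dict.empty
    = (pvPS fns).foldl (fun d pr => d.modify pr.1 [] (fun l => l ++ [pr.2]))
        PySem.Dict.empty := by
  unfold pvPS
  rw [List.foldl_flatMap]
  apply PySem.List.foldl_congr_mem
  intro d p _
  rw [List.foldl_map, PySem.List.foldl_ite_eq_foldl_filter]
  rfl

theorem pv_values_eq (fns : List (List Int)) :
    ((pvPS fns).foldl (fun d pr => d.modify pr.1 [] (fun l => l ++ [pr.2]))
        PySem.Dict.empty).values
      = (pvKeys fns).map (pvG fns) := by
  have hnd : ((pvPS fns).foldl (fun d pr => d.modify pr.1 [] (fun l => l ++ [pr.2]))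
      PySem.Dict.empty).keys.Nodup := by
    exact PySem.Dict.nodup_keys_foldl_modify_key (pvPS fns) (fun pr => pr.1) []
      (fun _ pr => fun l => l ++ [pr.2]) PySem.Dict.empty PySem.Dict.nodup_keys_empty
  rw [PySem.Dict.values_eq_map_keys _ hnd []]
  have hkeys : ((pvPS fns).foldl (fun d pr => d.modify pr.1 [] (fun l => l ++ [pr.2]))
      PySem.Dict.empty).keys = pvKeys fns := by
    rw [PySem.Dict.keys_foldl_modify_key (key := fun pr : Int × (Int × Int) => pr.1)
      (d0 := ([] : List (Int × Int))) (f := fun _ pr => fun l => l ++ [pr.2])]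
    rw [PySem.Dict.keys_empty, PySem.Set.update_nil_left]
    rfl
  rw [hkeys]
  apply List.map_congr_left
  intro v _
  rw [PySem.Dict.getD_foldl_modify_append, PySem.Dict.getD_empty, List.nil_append]
  rfl

-- the three nested bucket loops, flattened to one fold over the expanded event stream
theorem pv_fold3 (vals : List (List (Int × Int))) (bk0 : List (List (List Int))) :
    vals.foldl
      (fun bk faces =>
        faces.foldl
          (fun bk fp =>
            faces.foldl
              (fun bk gp =>
                if gp.1 ≠ fp.1
                then pvAt fp.1 (pvAt fp.2 (fun c => c ++ [gp.1])) bk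
                else bk)
              bk)
          bk)
      bk0
    = (vals.flatMap pvExpand).foldl
        (fun bk t => pvAt t.1 (pvAt t.2.1 (fun c => c ++ [t.2.2])) bk) bk0 := by
  rw [List.foldl_flatMap]
  apply PySem.List.foldl_congr_mem
  intro bk fl _
  unfold pvExpand
  rw [List.foldl_flatMap]
  apply PySem.List.foldl_congr_mem
  intro bk' fp _
  rw [List.foldl_map, PySem.List.foldl_ite_eq_foldl_filter]

theorem pv_counter_flatten (ll : List (List Int)) :
    ll.foldl (fun c bucket => bucket.foldl (fun c g => c.modify g 0 (· + 1)) c) PySem.Dict.empty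
      = PySem.Dict.counter ll.flatten := by
  rw [PySem.Dict.counter_eq_foldl]
  induction ll using List.reverseRecOn with
  | nil => rfl
  | append_singleton ll b ih =>
    rw [List.foldl_append, List.flatten_append, List.foldl_append, ih]
    simp

theorem pv_main (fns : List (List Int)) :
    build_boundary_adjacency_py fns = build_boundary_adjacency_py_alt fns := by
  simp only [build_boundary_adjacency_py, build_boundary_adjacency_py_alt]
  rw [pv_dict_flat, pv_fold3, pv_values_eq]
  rw [show ((pvKeys fns).map (pvG fns)).flatMap pvExpand
      = pvTS fns by unfold pvTS; rw [List.flatMap_map]]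
  have hbk0 : fns.map (fun nodes => nodes.map (fun _ => ([] : List Int)))
      = (PySem.List.enumerate fns).map
          (fun p => (PySem.List.enumerate p.2).map (fun q => ([] : List Int))) := by
    rw [pv_map_eq_enum_map]
    apply List.map_congr_left
    intro p _
    rw [pv_map_eq_enum_map]
  rw [hbk0, pv_scatter (pvTS fns) fns (fun _ _ => []), PySem.List.foldl_append_singleton_eq_map,
    PySem.List.foldl_append_singleton_eq_map, List.map_map, List.nil_append, List.nil_append]
  apply List.map_congr_left
  intro p hp
  rcases (PySem.List.mem_enumerate_iff fns 0 p).1 hp with ⟨k, hk, rfl⟩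
  simp only [Function.comp_apply, Int.zero_add]
  -- B side: the bucket row of face k, flattened, counted
  rw [pv_counter_flatten]
  have hflat : ((PySem.List.enumerate fns[k]).map
        (fun q => [] ++ pvC (pvTS fns) (k : Int) q.1)).flatten
      = pvS fns (k : Int) fns[k] := by
    simp only [List.nil_append]
    rw [← List.flatMap_def]
    exact pv_row fns k hk
  rw [hflat]
  -- A side (as in the proof for the original pair of loops)
  have hempty : PySem.Set.empty = ([] : PySem.Set Int) := rfl
  simp only [pv_getD_build]
  rw [hempty, pv_foldl_update]
  rw [pv_update_congr fns[k] (pvIncFrom fns 0) (pvLB fns) [] (fun v _ => pv_ofList_inc_dedup fns v),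
    ← pv_update_dedup, PySem.Set.update_nil_left]
  simp only [PySem.Set.discard]
  rw [← pv_neq_fun ((k : Int)), ← pv_ofList_filter, List.filter_flatMap]
  have hS : List.flatMap (fun a => List.filter (fun x => decide (x ≠ (k : Int))) (pvLB fns a))
      (PySem.List.dedup fns[k]) = pvS fns (k : Int) fns[k] := rfl
  rw [hS]
  -- both sides are now filters over ofList (pvS …); compare pointwise
  rw [PySem.Dict.items_counter, List.filter_map, List.map_map]
  simp only [Function.comp_def]
  have hid : (fun x : Int => (x, ((pvS fns (k : Int) fns[k]).count x : Int)).1) = fun x => x := rfl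
  rw [hid, List.map_id_fun', id]
  rw [pv_foldl_add_if _ _ (PySem.Set.nodup_ofList _),
    PySem.Set.ofList_eq_self_of_nodup _ ((PySem.Set.nodup_ofList _).filter _)]
  apply List.filter_congr
  intro g hg
  rcases pv_mem_S fns fns[k] (k : Int) g ((PySem.Set.mem_ofList _ g).1 hg) with ⟨k', hk', rfl, hgi⟩
  have hget : ∀ (j : Nat) (hj : j < fns.length),
      PySem.List.pyGetD (fns.map (fun nodes => PySem.Set.ofList nodes)) (j : Int) []
        = PySem.Set.ofList (fns[j]'hj) := by
    intro j hj
    rw [PySem.List.pyGetD_natCast, List.getD_eq_getElem _ _ (by simpa using hj), List.getElem_map]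
  rw [hget k hk, hget k' hk', pv_len_inter, pv_count_S fns fns[k] (k : Int) (k' : Int) k' hk' rfl hgi]

-- ===== VERDICT (by name: the statement is the Claim_ definition above) =====
theorem build_boundary_adjacency_py_spec : Claim_equal_build_boundary_adjacency_py := by
  intro face_nodes _
  unfold Spec_build_boundary_adjacency_py
  exact pv_main face_nodes
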